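-- pv_equiv track=rewrite | github.com/kirkeby/sheared | sheared/protocol/http.py | parseHeaderLines
-- ===== SOURCE A (Python) =====
-- def parseHeaderLines(s):
--     lines = []
--     physical = s.split('\r\n')
--     for line in physical:
--         if line == '':
--             continue
--         if line[0] in '\t ':
--             if not lines:
--                 raise ValueError('first line cannot be a continued line')
--             lines[-1] = lines[-1] + line
--         else:
--             lines.append(line)
--
--     for line in lines:
--         yield parseHeaderLine(line)
--
-- def parseHeaderLine(s):
--     try:
--         name, value = s.split(': ')
--         if not name:
--             raise ValueError
--     except ValueError:
--         raise ValueError('"%s" is not a proper HTTP header' % s)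
--     return name, value
-- ===== SOURCE B (Python) =====
-- def parseHeaderLines(s):
--     # Single-pass streaming generator: one pending logical line,
--     # flushed (parsed and yielded) as soon as the next logical line starts.
--     current = None
--     for line in s.split('\r\n'):
--         if line == '':
--             continue
--         if line[0] in '\t ':
--             if current is None:
--                 raise ValueError('first line cannot be a continued line')
--             current = current + line
--         else:
--             if current is not None:
--                 yield parseHeaderLine(current)
--             current = line
--     if current is not None:
--         yield parseHeaderLine(current)
--
-- def parseHeaderLine(s):
--     try:
--         name, value = s.split(': ')
--         if not name:
--             raise ValueError
--     except ValueError: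
--         raise ValueError('"%s" is not a proper HTTP header' % s)
--     return name, value
-- ===== Notes on version B (the rewrite author's own statement) =====
-- stated objective: alternative
-- what changed: Replaced A's two-phase shape (build the full list of logical lines by repeatedly rewriting its last element, then parse each) with a single-pass streaming generator that keeps one pending logical line and yields each parsed header as soon as the next logical line starts.
import Mathlib
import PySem

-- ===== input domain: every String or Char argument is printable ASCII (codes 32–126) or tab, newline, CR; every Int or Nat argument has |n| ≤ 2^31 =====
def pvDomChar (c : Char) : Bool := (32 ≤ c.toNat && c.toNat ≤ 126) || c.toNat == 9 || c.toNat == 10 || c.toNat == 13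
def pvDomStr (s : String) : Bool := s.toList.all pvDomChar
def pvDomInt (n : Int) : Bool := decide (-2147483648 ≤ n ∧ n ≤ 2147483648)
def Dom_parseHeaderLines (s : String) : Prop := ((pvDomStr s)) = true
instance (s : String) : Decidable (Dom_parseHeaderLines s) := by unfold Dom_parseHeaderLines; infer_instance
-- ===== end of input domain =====

-- B is a single-pass streaming generator (one scalar 'current' line) instead of A's
-- build-all-logical-lines-then-parse two-phase shape; same cost, alternative decomposition.
-- Both Pythons are generators; the equivalence is about the list of yielded pairs.

-- ===== PORT A =====

-- parseHeaderLine: s.split(': ') must give exactly [name, value] with a nonempty name (else ValueError, modelled as none)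
def pvParseLine? (l : List Char) : Option (List Char × List Char) :=
  match PySem.Chars.splitOn l [':', ' '] with
  | [name, value] => if name = [] then none else some (name, value)
  | _ => none

-- first loop of A: build the list of logical lines (none = the first-line-continuation ValueError)
def pvIsCont (l : List Char) : Bool :=
  match l with
  | c :: _ => c = '\t' || c = ' '
  | [] => false

def pvLinesA (phys : List (List Char)) (lines : List (List Char)) : Option (List (List Char)) :=
  match phys with
  | [] => some lines
  | line :: rest =>
    if line = [] then pvLinesA rest lines
    else if pvIsCont line then
      match lines.getLast? with
      | none => none                                    -- raise ValueError('first line cannot be …')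
      | some last => pvLinesA rest (lines.dropLast ++ [last ++ line])  -- lines[-1] = lines[-1] + line
    else pvLinesA rest (lines ++ [line])

-- second loop of A: yield parseHeaderLine(line) for each logical line (none = ValueError mid-stream)
def pvYieldA (lines : List (List Char)) : Option (List (List Char × List Char)) :=
  match lines with
  | [] => some []
  | l :: rest => do
    let p ← pvParseLine? l
    let ps ← pvYieldA rest
    pure (p :: ps)

def parseHeaderLines (s : String) : List (String × String) :=
  match (pvLinesA (PySem.Chars.splitOn s.toList ['\r', '\n']) []).bind pvYieldA with
  | some ps => ps.map (fun p => (String.ofList p.1, String.ofList p.2))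
  | none => []                                          -- Python raises here; excluded by Pre_

-- ===== PORT B =====

-- the streaming loop of Source B: state is just the optional pending logical line;
-- a finished logical line is parsed and yielded (consed) as soon as the next one starts.
def pvRunB (phys : List (List Char)) (cur : Option (List Char)) :
    Option (List (List Char × List Char)) :=
  match phys with
  | [] =>
    match cur with
    | none => some []
    | some c => (pvParseLine? c).map ([·])             -- final flush
  | line :: rest =>
    if line = [] then pvRunB rest cur
    else if pvIsCont line then
      match cur with
      | none => none                                    -- raise ValueError('first line cannot be …')
      | some c => pvRunB rest (some (c ++ line))
    else
      match cur with
      | none => pvRunB rest (some line)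
      | some c => do
        let p ← pvParseLine? c                          -- yield the parsed pending line
        let ps ← pvRunB rest (some line)
        pure (p :: ps)

def parseHeaderLines_alt (s : String) : List (String × String) :=
  match pvRunB (PySem.Chars.splitOn s.toList ['\r', '\n']) none with
  | some ps => ps.map (fun p => (String.ofList p.1, String.ofList p.2))
  | none => []                                          -- Python raises here; excluded by Pre_

-- ===== PRECONDITION & SPEC =====

-- group the non-blank physical lines into logical lines (head line plus following continuation run)
def pvGroupsGo (ls : List (List Char)) (acc : List Char) : List (List Char) :=
  match ls with
  | [] => [acc]
  | l :: rest => if pvIsCont l then pvGroupsGo rest (acc ++ l) else acc :: pvGroupsGo rest l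

def pvGroups (ls : List (List Char)) : List (List Char) :=
  match ls with
  | [] => []
  | l :: rest => pvGroupsGo rest l

def pvWF (l : List Char) : Bool :=
  match PySem.Chars.splitOn l [':', ' '] with
  | [name, _] => !name.isEmpty
  | _ => false

-- Pre_ excludes exactly the inputs on which A raises ValueError: a first non-blank physical
-- line starting with tab/space, or a logical line that that does not split into exactly a nonempty field name and a value.
def Pre_parseHeaderLines (s : String) : Prop :=
  ((PySem.Chars.splitOn s.toList ['\r', '\n']).filter (· ≠ [])).head?.all (fun l => !pvIsCont l) = true ∧
  (pvGroups ((PySem.Chars.splitOn s.toList ['\r', '\n']).filter (· ≠ []))).all pvWF = true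
instance (s : String) : Decidable (Pre_parseHeaderLines s) := by unfold Pre_parseHeaderLines; infer_instance

def pvWitness_parseHeaderLines : String := "Host: example\r\n\tcom\r\nAccept: text"

def Spec_parseHeaderLines (s : String) (out : List (String × String)) : Prop := out = parseHeaderLines_alt s
instance (s : String) (out : List (String × String)) : Decidable (Spec_parseHeaderLines s out) := by unfold Spec_parseHeaderLines; infer_instance

-- ===== CLAIM (what is proved, stated in full; the proofs are below) =====
def Claim_equal_parseHeaderLines : Prop := ∀ (s : String), Dom_parseHeaderLines s → Pre_parseHeaderLines s → Spec_parseHeaderLines s (parseHeaderLines s)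

-- ===== LEMMAS AND PROOFS =====


theorem pvRunB_cons (line : List Char) (rest : List (List Char)) (cur : Option (List Char)) :
    pvRunB (line :: rest) cur =
      (if line = [] then pvRunB rest cur
       else if pvIsCont line then
         match cur with
         | none => none
         | some c => pvRunB rest (some (c ++ line))
       else
         match cur with
         | none => pvRunB rest (some line)
         | some c => do
           let p ← pvParseLine? c
           let ps ← pvRunB rest (some line)
           pure (p :: ps)) := rfl

theorem pvLinesA_cons (line : List Char) (rest lines : List (List Char)) :
    pvLinesA (line :: rest) lines =
      (if line = [] then pvLinesA rest lines
       else if pvIsCont line then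
         match lines.getLast? with
         | none => none
         | some last => pvLinesA rest (lines.dropLast ++ [last ++ line])
       else pvLinesA rest (lines ++ [line])) := rfl

theorem pvYieldA_concat (ls : List (List Char)) (c : List Char) :
    pvYieldA (ls ++ [c]) =
      (pvYieldA ls).bind (fun out => (pvParseLine? c).map (fun p => out ++ [p])) := by
  induction ls with
  | nil => cases h : pvParseLine? c <;> simp [pvYieldA, h]
  | cons l rest ih =>
    cases hp : pvParseLine? l <;>
      cases hr : pvYieldA rest <;>
        simp [pvYieldA, hp, hr, ih] <;>
          cases hc : pvParseLine? c <;> simp [hc]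

-- the heart of the equivalence: A's fold over the remaining physical lines, started from the
-- logical lines B has already emitted plus B's pending line, yields what B yields.
theorem pvAB (phys : List (List Char)) (emitted : List (List Char)) (cur : Option (List Char))
    (h : cur = none → emitted = []) :
    (pvLinesA phys (emitted ++ cur.toList)).bind pvYieldA =
      (pvYieldA emitted).bind (fun out => (pvRunB phys cur).map (fun ps => out ++ ps)) := by
  induction phys generalizing emitted cur with
  | nil =>
    cases cur with
    | none =>
      simp [h rfl, pvLinesA, pvRunB, pvYieldA]
    | some c =>
      have hl : (pvLinesA [] (emitted ++ (some c).toList)).bind pvYieldA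
          = pvYieldA (emitted ++ [c]) := rfl
      have hr : pvRunB [] (some c) = (pvParseLine? c).map ([·]) := rfl
      rw [hl, pvYieldA_concat, hr]
      cases he : pvYieldA emitted <;> cases hc : pvParseLine? c <;> simp [hc]
  | cons line rest ih =>
    rw [pvLinesA_cons, pvRunB_cons]
    by_cases hb : line = []
    · rw [if_pos hb, if_pos hb]
      exact ih emitted cur h
    · rw [if_neg hb, if_neg hb]
      by_cases hcont : pvIsCont line = true
      · rw [if_pos hcont, if_pos hcont]
        cases cur with
        | none =>
          simp [h rfl, List.getLast?]
        | some c =>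
          simp only [Option.toList_some, List.getLast?_concat, List.dropLast_concat]
          have := ih emitted (some (c ++ line)) (by intro hx; cases hx)
          simpa using this
      · rw [if_neg hcont, if_neg hcont]
        cases cur with
        | none =>
          have := ih [] (some line) (by intro hx; cases hx)
          simpa [h rfl, pvYieldA] using this
        | some c =>
          have := ih (emitted ++ [c]) (some line) (by intro hx; cases hx)
          simp only [Option.toList_some] at this ⊢
          rw [this, pvYieldA_concat]
          cases he : pvYieldA emitted <;> cases hc : pvParseLine? c <;>
            cases hr2 : pvRunB rest (some line) <;> simp [hc, hr2, List.append_assoc]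

theorem pvAB_main (phys : List (List Char)) :
    (pvLinesA phys []).bind pvYieldA = pvRunB phys none := by
  have := pvAB phys [] none (fun _ => rfl)
  simpa [pvYieldA] using this

-- ===== VERDICT (by name: the statement is the Claim_ definition above) =====
theorem parseHeaderLines_spec : Claim_equal_parseHeaderLines := by
  intro s _ _
  unfold Spec_parseHeaderLines parseHeaderLines parseHeaderLines_alt
  rw [pvAB_main]
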